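-- pv_equiv track=rewrite | github.com/jerobarraco/utils | dist/custom.py | fixAndroidLink
-- ===== SOURCE A (Python) =====
-- def fixAndroidLink(args, CONF={}):
-- 	"""This is just to try to fix linking (on android)
-- 	if the executable is clang, adds ++ and removes _
-- 	This depends on you using (forcing) 'clang' as the compiler (and not clang++)
-- 	Will mutate args"""
--
-- 	# only check on clang not clang++ (important because we need to remove _)
-- 	# this means, you should avoid to shadow/override clang++
-- 	is_clang = args[0].endswith('/clang') or args[0].endswith('/clang_')
-- 	if not is_clang: return False
--
-- 	has_out = False
-- 	is_link = False
-- 	#verify the out is an so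
-- 	for a in args:
-- 		if a == '-o':
-- 			has_out = True
-- 			continue
-- 		if not has_out: continue
-- 		if a.endswith('.so'):
-- 			is_link = True
-- 			break
-- 		has_out = False
--
-- 	if is_link:
-- 		if args[0][-1] == '_':
-- 			args[0]=args[0][:-1] #remove the _ , linker needs to not have it (really)
--
-- 		if not args[0].endswith('++'): # force to use ++
-- 			args[0] += '++'
-- 	return is_link
-- ===== SOURCE B (Python) =====
-- def fixAndroidLink(args, CONF={}):
--     """Re-implementation: instead of walking every token with a has_out state
--     machine, jump straight between the '-o' occurrences with list.index(start)
--     and inspect only their successors. Mutates args[0] like the original."""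
--     if not (args[0].endswith('/clang') or args[0].endswith('/clang_')):
--         return False
--     is_link = False
--     start = 0
--     while not is_link:
--         try:
--             i = args.index('-o', start)
--         except ValueError:
--             break
--         if i + 1 < len(args) and args[i + 1].endswith('.so'):
--             is_link = True
--         start = i + 1
--     if is_link:
--         if args[0][-1] == '_':
--             args[0] = args[0][:-1]
--         if not args[0].endswith('++'):
--             args[0] += '++'
--     return is_link
-- ===== Notes on version B (the rewrite author's own statement) =====
-- stated objective: alternative
-- what changed: Replaced the per-token has_out state-machine scan with an exception-driven skip-search: list.index('-o', start) jumps directly from one '-o' occurrence to the next and only their successor tokens are inspected.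
-- outside the precondition, e.g. on fixAndroidLink([], {}): A raises IndexError, B raises IndexError
import Mathlib
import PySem

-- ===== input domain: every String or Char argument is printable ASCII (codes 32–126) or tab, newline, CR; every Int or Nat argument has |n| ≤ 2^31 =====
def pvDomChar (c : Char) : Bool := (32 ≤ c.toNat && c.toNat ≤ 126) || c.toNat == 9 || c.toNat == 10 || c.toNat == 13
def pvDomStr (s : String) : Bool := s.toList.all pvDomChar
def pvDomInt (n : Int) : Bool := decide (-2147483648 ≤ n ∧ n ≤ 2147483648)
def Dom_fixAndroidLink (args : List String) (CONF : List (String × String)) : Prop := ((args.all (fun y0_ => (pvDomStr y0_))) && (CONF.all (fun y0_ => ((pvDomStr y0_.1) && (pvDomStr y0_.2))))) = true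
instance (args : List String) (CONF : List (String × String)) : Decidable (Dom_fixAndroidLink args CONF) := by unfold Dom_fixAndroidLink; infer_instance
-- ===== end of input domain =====

-- B replaces A's per-token has_out state machine with an index-jumping search over the
-- '-o' occurrences ('alternative' decomposition, same cost). Both Pythons mutate args[0]
-- identically when is_link; the equivalence proved here is about the RETURN value only.

-- ===== PORT A =====
-- A's for-loop with has_out state and break (break modelled by returning true)
def pvLoopA : List String → Bool → Bool
  | [], _ => false
  | a :: rest, has_out =>
    if a = "-o" then pvLoopA rest true
    else if has_out = false then pvLoopA rest has_out
    else if PySem.Str.endswith a ".so" then true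
    else pvLoopA rest false

def fixAndroidLink (args : List String) (_CONF : List (String × String)) : Bool :=
  match PySem.List.pyGet? args 0 with
  | none => false  -- args[0] raises IndexError on []; excluded by Pre_
  | some a0 =>
    let is_clang := PySem.Str.endswith a0 "/clang" || PySem.Str.endswith a0 "/clang_"
    if is_clang = false then false
    else pvLoopA args false

-- ===== PORT B =====
-- args.index('-o', start): first index ≥ start holding "-o" (none = ValueError)
def pvIndexFrom (xs : List String) (x : String) (start : Nat) : Option Nat :=
  (PySem.List.index? (xs.drop start) x).map (· + start)

-- bounds fact the while-loop's termination cites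
theorem pvIndexFrom_bounds {xs : List String} {x : String} {start i : Nat}
    (h : pvIndexFrom xs x start = some i) : start ≤ i ∧ i < xs.length := by
  unfold pvIndexFrom at h
  rcases hj : PySem.List.index? (xs.drop start) x with _ | j
  · rw [hj] at h; simp at h
  · rw [hj] at h
    simp only [Option.map_some, Option.some.injEq] at h
    obtain ⟨pre, suf, hsplit, hlen, -⟩ := (PySem.List.index?_eq_some_iff _ _ _).mp hj
    have hL : (xs.drop start).length = pre.length + (suf.length + 1) := by simp [hsplit]
    rw [List.length_drop] at hL
    omega

-- B's while loop: jump to the next '-o' at or after start, test its successor, else retry past it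
def pvSearch (args : List String) (start : Nat) : Bool :=
  match h : pvIndexFrom args "-o" start with
  | none => false
  | some i =>
    -- i + 1 < len(args) and args[i+1].endswith('.so')
    if (match args[i+1]? with | some b => PySem.Str.endswith b ".so" | none => false) then true
    else pvSearch args (i + 1)
termination_by args.length - start
decreasing_by
  have := pvIndexFrom_bounds h
  omega

def fixAndroidLink_alt (args : List String) (_CONF : List (String × String)) : Bool :=
  match PySem.List.pyGet? args 0 with
  | none => false  -- args[0] raises IndexError on []; excluded by Pre_
  | some a0 =>
    if (PySem.Str.endswith a0 "/clang" || PySem.Str.endswith a0 "/clang_") = false then false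
    else pvSearch args 0

-- ===== PRECONDITION & SPEC =====
-- A evaluates args[0], which raises IndexError on the empty list; Pre_ excludes exactly that.
def Pre_fixAndroidLink (args : List String) (_CONF : List (String × String)) : Prop := args ≠ []
instance (args : List String) (CONF : List (String × String)) : Decidable (Pre_fixAndroidLink args CONF) := by unfold Pre_fixAndroidLink; infer_instance
def pvWitness_fixAndroidLink : List String × (List (String × String)) := (["p/clang", "-o", "x.so"], [])

def Spec_fixAndroidLink (args : List String) (CONF : List (String × String)) (out : Bool) : Prop := out = fixAndroidLink_alt args CONF
instance (args : List String) (CONF : List (String × String)) (out : Bool) : Decidable (Spec_fixAndroidLink args CONF out) := by unfold Spec_fixAndroidLink; infer_instance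

-- ===== CLAIM (what is proved, stated in full; the proofs are below) =====
def Claim_equal_fixAndroidLink : Prop := ∀ (args : List String) (CONF : List (String × String)), Dom_fixAndroidLink args CONF → Pre_fixAndroidLink args CONF → Spec_fixAndroidLink args CONF (fixAndroidLink args CONF)

-- ===== LEMMAS AND PROOFS =====

-- head of xs ends with ".so"
def pvHeadSo (xs : List String) : Bool :=
  match xs with
  | [] => false
  | b :: _ => PySem.Str.endswith b ".so"

-- reference predicate: some '-o' token is immediately followed by a '.so' token
def pvPairAny : List String → Bool
  | [] => false
  | a :: l => ((a == "-o") && pvHeadSo l) || pvPairAny l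

lemma pvLoopA_eq (xs : List String) :
    pvLoopA xs true = (pvHeadSo xs || pvPairAny xs) ∧ pvLoopA xs false = pvPairAny xs := by
  induction xs with
  | nil => simp [pvLoopA, pvHeadSo, pvPairAny]
  | cons a l ih =>
    obtain ⟨ih1, ih2⟩ := ih
    by_cases ha : a = "-o"
    · subst ha
      have hso : PySem.Chars.endswith ['-', 'o'] ['.', 's', 'o'] = false := by decide
      constructor
      · simp [pvLoopA, pvHeadSo, pvPairAny, hso, ih1]
      · simp [pvLoopA, pvHeadSo, pvPairAny, ih1]
    · cases hES : PySem.Chars.endswith a.toList ['.', 's', 'o'] with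
      | true =>
        constructor
        · simp [pvLoopA, pvHeadSo, pvPairAny, ha, hES]
        · simp [pvLoopA, pvHeadSo, pvPairAny, ha, ih2]
      | false =>
        constructor
        · simp [pvLoopA, pvHeadSo, pvPairAny, ha, hES, ih2]
        · simp [pvLoopA, pvHeadSo, pvPairAny, ha, ih2]

lemma pvPairAny_no_o (xs : List String) (h : "-o" ∉ xs) : pvPairAny xs = false := by
  induction xs with
  | nil => rfl
  | cons a l ih =>
    simp only [List.mem_cons, not_or] at h
    simp [pvPairAny, ih h.2, show a ≠ "-o" from fun ha => h.1 ha.symm]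

lemma pvPairAny_skip (t : List String) (r : List String) (h : "-o" ∉ t) :
    pvPairAny (t ++ r) = pvPairAny r := by
  induction t with
  | nil => rfl
  | cons a l ih =>
    simp only [List.mem_cons, not_or] at h
    simp [pvPairAny, List.cons_append, Ne.symm h.1, ih h.2]

lemma pvSearch_eq_pairAny (args : List String) (start : Nat) :
    pvSearch args start = pvPairAny (args.drop start) := by
  induction hn : args.length - start using Nat.strong_induction_on generalizing start with
  | _ n ih =>
    rw [pvSearch]
    split
    · -- no '-o' at or after start
      next hidx =>
      have hno : "-o" ∉ args.drop start := by
        unfold pvIndexFrom at hidx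
        rcases hj : PySem.List.index? (args.drop start) "-o" with _ | j
        · exact (PySem.List.index?_eq_none_iff _ _).mp hj
        · rw [hj] at hidx; simp at hidx
      simp [pvPairAny_no_o _ hno]
    · next i hidx =>
      obtain ⟨hsi, hil⟩ := pvIndexFrom_bounds hidx
      -- decompose the suffix at the first '-o'
      unfold pvIndexFrom at hidx
      rcases hj : PySem.List.index? (args.drop start) "-o" with _ | j
      · rw [hj] at hidx; simp at hidx
      · rw [hj] at hidx
        simp only [Option.map_some, Option.some.injEq] at hidx
        obtain ⟨pre, suf, hsplit, hlen, hpre⟩ := (PySem.List.index?_eq_some_iff _ _ _).mp hj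
        -- args.drop start = pre ++ "-o" :: suf, |pre| = j, i = j + start
        have hsuffix : args.drop (i + 1) = suf := by
          have h1 : args.drop (i + 1) = (args.drop start).drop (j + 1) := by
            rw [List.drop_drop]; congr 1; omega
          rw [h1, hsplit, show pre ++ "-o" :: suf = (pre ++ ["-o"]) ++ suf from by simp]
          exact List.drop_left' (by simp [hlen])
        have hhead : args[i+1]? = suf.head? := by
          rw [← hsuffix, List.head?_drop]
        have hpair : pvPairAny (args.drop start) = (pvHeadSo suf || pvPairAny suf) := by
          rw [hsplit, pvPairAny_skip pre _ hpre]
          simp [pvPairAny]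
        have hmatch : (match args[i+1]? with
            | some b => PySem.Str.endswith b ".so" | none => false) = pvHeadSo suf := by
          rw [hhead]; cases suf <;> simp [pvHeadSo]
        rw [hmatch, hpair]
        cases hso : pvHeadSo suf with
        | true => simp
        | false =>
          have hrec := ih (args.length - (i + 1)) (by omega) (i + 1) rfl
          rw [hrec, hsuffix] at *
          simp

-- ===== VERDICT (by name: the statement is the Claim_ definition above) =====
theorem fixAndroidLink_spec : Claim_equal_fixAndroidLink := by
  intro args CONF _ _
  unfold Spec_fixAndroidLink
  cases args with
  | nil => rfl
  | cons a0 rest =>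
    have hA : fixAndroidLink (a0 :: rest) CONF =
        (if (PySem.Str.endswith a0 "/clang" || PySem.Str.endswith a0 "/clang_") = false then false
         else pvLoopA (a0 :: rest) false) := by
      unfold fixAndroidLink
      rw [PySem.List.pyGet?_zero_cons]
    have hB : fixAndroidLink_alt (a0 :: rest) CONF =
        (if (PySem.Str.endswith a0 "/clang" || PySem.Str.endswith a0 "/clang_") = false then false
         else pvSearch (a0 :: rest) 0) := by
      unfold fixAndroidLink_alt
      rw [PySem.List.pyGet?_zero_cons]
    rw [hA, hB]
    by_cases hc : (PySem.Str.endswith a0 "/clang" || PySem.Str.endswith a0 "/clang_") = false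
    · rw [if_pos hc, if_pos hc]
    · rw [if_neg hc, if_neg hc]
      rw [(pvLoopA_eq (a0 :: rest)).2, pvSearch_eq_pairAny (a0 :: rest) 0]
      rfl
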